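-- pv_equiv track=rewrite | github.com/BackofenLab/CRISPRidentify | components/detection.py | complete_with_all_intermediate
-- ===== SOURCE A (Python) =====
-- def complete_with_all_intermediate(group_to_complete):
--     if len(group_to_complete) < 2:
--         return group_to_complete
--     else:
--         group_to_complete = sorted(group_to_complete, key=lambda x: len(x), reverse=True)
--         longest_one = group_to_complete[0]
--         length_longest = len(longest_one)
--         shortest_one = group_to_complete[-1]
--         all_possible_substrings = [longest_one[i:j+1] for i in range(length_longest)
--                                    for j in range(i, length_longest)
--                                    if len(longest_one[i:j+1]) > len(shortest_one)]
--
--         for candidate in all_possible_substrings: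
--             if shortest_one in candidate:
--                 group_to_complete.append(candidate)
--
--     return group_to_complete
-- ===== SOURCE B (Python) =====
-- def complete_with_all_intermediate(group_to_complete):
--     if len(group_to_complete) < 2:
--         return group_to_complete
--     group_sorted = sorted(group_to_complete, key=lambda x: len(x), reverse=True)
--     longest_one = group_sorted[0]
--     shortest_one = group_sorted[-1]
--     length_longest = len(longest_one)
--     m = len(shortest_one)
--     out = list(group_sorted)
--     i = 0
--     while i < length_longest:
--         p = longest_one.find(shortest_one, i)
--         if p == -1:
--             break
--         for j in range(max(p + m - 1, i + m), length_longest):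
--             out.append(longest_one[i:j + 1])
--         i += 1
--     return out
-- ===== Notes on version B (the rewrite author's own statement) =====
-- stated objective: alternative
-- what changed: Instead of materialising every substring of the longest string and containment-testing the shortest in each, B runs one str.find of the shortest per start index and directly emits exactly the qualifying substrings, breaking once no occurrence remains; it trades the candidate enumeration for occurrence arithmetic.
import Mathlib
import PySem

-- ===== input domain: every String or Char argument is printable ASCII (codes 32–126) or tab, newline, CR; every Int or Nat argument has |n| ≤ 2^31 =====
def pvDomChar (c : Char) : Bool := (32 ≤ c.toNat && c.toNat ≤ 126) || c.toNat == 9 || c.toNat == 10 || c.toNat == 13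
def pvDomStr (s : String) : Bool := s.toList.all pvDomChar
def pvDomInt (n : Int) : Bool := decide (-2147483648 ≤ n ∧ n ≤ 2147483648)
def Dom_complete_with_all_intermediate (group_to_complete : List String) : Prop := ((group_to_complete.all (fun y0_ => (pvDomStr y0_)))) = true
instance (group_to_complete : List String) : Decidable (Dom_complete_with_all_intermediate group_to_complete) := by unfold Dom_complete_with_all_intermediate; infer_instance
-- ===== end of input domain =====

-- B replaces A's enumerate-all-substrings-and-test scan by one str.find per start
-- index, emitting exactly the matching substrings directly (objective: alternative).

-- ===== PORT A =====
def complete_with_all_intermediate (group_to_complete : List String) : List String :=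
  if group_to_complete.length < 2 then group_to_complete
  else
    let g := PySem.List.sorted group_to_complete (fun x => PySem.Str.len x) true
    let longest_one := (PySem.List.pyGet? g 0).getD ""
    let length_longest := PySem.Str.len longest_one
    let shortest_one := (PySem.List.pyGet? g (-1)).getD ""
    let all_possible_substrings :=
      (PySem.List.pyRange 0 length_longest 1).flatMap (fun i =>
        (PySem.List.pyRange i length_longest 1).filterMap (fun j =>
          let c := PySem.Str.slice longest_one (some i) (some (j + 1))
          if PySem.Str.len shortest_one < PySem.Str.len c then some c else none))
    all_possible_substrings.foldl
      (fun acc candidate =>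
        if PySem.Str.isIn shortest_one candidate then acc ++ [candidate] else acc) g

-- ===== PORT B =====
-- while i < L: p = longest.find(shortest, i); break on -1; emit longest[i:j+1] for
-- j in range(max(p+m-1, i+m), L); i += 1.  fuel only makes the while-loop structural.
def cwaiLoop (longest_one shortest_one : String) (L m i : Int) (fuel : Nat) : List String :=
  match fuel with
  | 0 => []
  | Nat.succ fuel' =>
    if i < L then
      let p := PySem.Str.findFrom longest_one shortest_one i none
      if p = -1 then []
      else
        ((PySem.List.pyRange (max (p + m - 1) (i + m)) L 1).map
            (fun j => PySem.Str.slice longest_one (some i) (some (j + 1))))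
          ++ cwaiLoop longest_one shortest_one L m (i + 1) fuel'
    else []

def complete_with_all_intermediate_alt (group_to_complete : List String) : List String :=
  if group_to_complete.length < 2 then group_to_complete
  else
    let g := PySem.List.sorted group_to_complete (fun x => PySem.Str.len x) true
    let longest_one := (PySem.List.pyGet? g 0).getD ""
    let shortest_one := (PySem.List.pyGet? g (-1)).getD ""
    let L := PySem.Str.len longest_one
    let m := PySem.Str.len shortest_one
    g ++ cwaiLoop longest_one shortest_one L m 0 L.toNat

-- ===== PRECONDITION & SPEC =====
def Spec_complete_with_all_intermediate (group_to_complete : List String) (out : List String) : Prop := out = complete_with_all_intermediate_alt group_to_complete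
instance (group_to_complete : List String) (out : List String) : Decidable (Spec_complete_with_all_intermediate group_to_complete out) := by unfold Spec_complete_with_all_intermediate; infer_instance

-- ===== CLAIM (what is proved, stated in full; the proofs are below) =====
def Claim_equal_complete_with_all_intermediate : Prop := ∀ (group_to_complete : List String), Dom_complete_with_all_intermediate group_to_complete → Spec_complete_with_all_intermediate group_to_complete (complete_with_all_intermediate group_to_complete)

-- ===== LEMMAS AND PROOFS =====

-- A's inner comprehension for a fixed start index i (length test only)
def aInner (longest_one shortest_one : String) (L i : Int) : List String :=
  (PySem.List.pyRange i L 1).filterMap (fun j =>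
    let c := PySem.Str.slice longest_one (some i) (some (j + 1))
    if PySem.Str.len shortest_one < PySem.Str.len c then some c else none)

-- A's inner list after the containment filter of the final loop
def cInner (longest_one shortest_one : String) (L i : Int) : List String :=
  (aInner longest_one shortest_one L i).filter
    (fun c => PySem.Str.isIn shortest_one c)

-- sub occurs in u.take n iff it occurs in u at some position fitting inside the first n chars
lemma infix_take_iff (u sub : List Char) (n : Nat) :
    sub <:+: u.take n ↔ ∃ k, k + sub.length ≤ n ∧ sub <+: u.drop k := by
  constructor
  · rintro ⟨pre, post, heq⟩
    refine ⟨pre.length, ?_, ?_⟩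
    · have hlen : pre.length + sub.length ≤ (u.take n).length := by
        rw [← heq]; simp
      have := List.length_take_le n u
      omega
    · obtain ⟨r, hr⟩ : pre ++ (sub ++ post) <+: u := by
        rw [← List.append_assoc, heq]; exact List.take_prefix n u
      have hdrop : u.drop pre.length = (sub ++ post) ++ r := by
        rw [← hr, List.append_assoc pre, List.drop_left]
      exact ⟨post ++ r, by rw [hdrop, List.append_assoc]⟩
  · rintro ⟨k, hle, r, hr⟩
    have hkn : k ≤ n := by omega
    have hsplit : u.take n = u.take k ++ (u.drop k).take (n - k) := by
      rw [← List.take_add]; congr 1; omega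
    have hsub : (u.drop k).take (n - k) = sub ++ r.take (n - k - sub.length) := by
      rw [← hr, List.take_append]
      congr 1
      exact List.take_of_length_le (by omega)
    rw [hsplit, hsub]
    exact ⟨u.take k, r.take (n - k - sub.length), by rw [List.append_assoc]⟩

-- containment in a prefix of u, characterised by u's first match position
lemma isIn_take_iff (u sub : List Char) (n : Nat) :
    PySem.Chars.isIn sub (u.take n) = true ↔
      (PySem.Chars.find u sub ≠ -1 ∧ (PySem.Chars.find u sub).toNat + sub.length ≤ n) := by
  rw [PySem.Chars.isIn_iff_infix, infix_take_iff]
  by_cases hf : PySem.Chars.find u sub = -1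
  · have hni : ¬ sub <:+: u := (PySem.Chars.find_eq_neg_one_iff u sub).mp hf
    constructor
    · rintro ⟨k, _, hpre⟩
      exact absurd (hpre.isInfix.trans (List.drop_suffix k u).isInfix) hni
    · rintro ⟨h, -⟩; exact absurd hf h
  · have hspec := PySem.Chars.findFrom_natCast_spec u sub 0 (Nat.zero_le _)
    rw [Nat.cast_zero, PySem.Chars.findFrom_zero] at hspec
    obtain ⟨-, hpre, hmin⟩ := hspec hf
    constructor
    · rintro ⟨k, hle, hpk⟩
      refine ⟨hf, ?_⟩
      have : (PySem.Chars.find u sub).toNat ≤ k := by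
        by_contra hlt
        exact hmin k (Nat.zero_le _) (by omega) hpk
      omega
    · rintro ⟨-, hle⟩
      exact ⟨(PySem.Chars.find u sub).toNat, hle, hpre⟩

-- characterisation of A's filtered inner list at start index k
lemma cInner_char (longest_one shortest_one : String) (k : Nat)
    (hk : k < longest_one.toList.length) :
    cInner longest_one shortest_one (PySem.Str.len longest_one) (k : Int) =
      (if PySem.Chars.find (longest_one.toList.drop k) shortest_one.toList = -1 then []
       else (PySem.List.pyRange
              (max ((k : Int) + PySem.Chars.find (longest_one.toList.drop k) shortest_one.toList
                      + PySem.Str.len shortest_one - 1)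
                   ((k : Int) + PySem.Str.len shortest_one))
              (PySem.Str.len longest_one) 1).map
         (fun j => PySem.Str.slice longest_one (some (k : Int)) (some (j + 1)))) := by
  have ht : PySem.Str.len longest_one = (longest_one.toList.length : Int) :=
    PySem.Str.len_eq longest_one
  have hm : PySem.Str.len shortest_one = (shortest_one.toList.length : Int) :=
    PySem.Str.len_eq shortest_one
  have hfm1 : -1 ≤ PySem.Chars.find (longest_one.toList.drop k) shortest_one.toList :=
    PySem.Chars.neg_one_le_find _ _
  unfold cInner aInner
  rw [List.filter_filterMap]
  have hcond : ∀ j ∈ PySem.List.pyRange (k : Int) (PySem.Str.len longest_one) 1,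
      Option.filter (fun c => PySem.Str.isIn shortest_one c)
        ((fun j =>
          let c := PySem.Str.slice longest_one (some (k : Int)) (some (j + 1))
          if PySem.Str.len shortest_one < PySem.Str.len c then some c else none) j) =
      (if PySem.Chars.find (longest_one.toList.drop k) shortest_one.toList ≠ -1 ∧
            (max ((k : Int) + PySem.Chars.find (longest_one.toList.drop k) shortest_one.toList
                    + PySem.Str.len shortest_one - 1)
                 ((k : Int) + PySem.Str.len shortest_one)) ≤ j
       then some (PySem.Str.slice longest_one (some (k : Int)) (some (j + 1))) else none) := by
    intro j hj
    rw [PySem.List.mem_pyRange_one, ht] at hj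
    obtain ⟨hkj, hjL⟩ := hj
    have hj0 : 0 ≤ j := le_trans (by exact_mod_cast Nat.zero_le k) hkj
    have hjcast : j = (j.toNat : Int) := by omega
    have hkjn : k ≤ j.toNat := by omega
    have hjnL : j.toNat < longest_one.toList.length := by omega
    have hjsucc : j + 1 = ((j.toNat + 1 : Nat) : Int) := by omega
    have hslice : (PySem.Str.slice longest_one (some (k : Int)) (some (j + 1))).toList
        = (longest_one.toList.drop k).take (j.toNat + 1 - k) := by
      rw [PySem.Str.toList_slice, PySem.Chars.slice_eq_listSlice, hjsucc,
        PySem.List.slice_natCast]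
    have hlc : PySem.Str.len (PySem.Str.slice longest_one (some (k : Int)) (some (j + 1)))
        = ((j.toNat + 1 - k : Nat) : Int) := by
      rw [PySem.Str.len_eq, hslice, List.length_take, List.length_drop]
      congr 1
      omega
    simp only []
    rw [hm, hlc]
    by_cases hP : (shortest_one.toList.length : Int) < ((j.toNat + 1 - k : Nat) : Int)
    · rw [if_pos hP, Option.filter_some]
      have hiniff : PySem.Str.isIn shortest_one
            (PySem.Str.slice longest_one (some (k : Int)) (some (j + 1))) = true ↔
          (PySem.Chars.find (longest_one.toList.drop k) shortest_one.toList ≠ -1 ∧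
            (PySem.Chars.find (longest_one.toList.drop k) shortest_one.toList).toNat
              + shortest_one.toList.length ≤ j.toNat + 1 - k) := by
        rw [PySem.Str.isIn_eq, hslice, isIn_take_iff]
      by_cases hc : PySem.Chars.find (longest_one.toList.drop k) shortest_one.toList ≠ -1 ∧
          (PySem.Chars.find (longest_one.toList.drop k) shortest_one.toList).toNat
            + shortest_one.toList.length ≤ j.toNat + 1 - k
      · have hf0 : 0 ≤ PySem.Chars.find (longest_one.toList.drop k) shortest_one.toList := by
          rcases hc with ⟨h1, -⟩; omega
        have hftn : ((PySem.Chars.find (longest_one.toList.drop k) shortest_one.toList).toNat : Int)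
            = PySem.Chars.find (longest_one.toList.drop k) shortest_one.toList := by omega
        rw [if_pos (hiniff.mpr hc), if_pos ⟨hc.1, by have h2c := hc.2; omega⟩]
      · rw [if_neg (fun h => hc (hiniff.mp h)), if_neg ?_]
        rintro ⟨hfne, hmax⟩
        apply hc
        have hf0 : 0 ≤ PySem.Chars.find (longest_one.toList.drop k) shortest_one.toList := by omega
        have hftn : ((PySem.Chars.find (longest_one.toList.drop k) shortest_one.toList).toNat : Int)
            = PySem.Chars.find (longest_one.toList.drop k) shortest_one.toList := by omega
        exact ⟨hfne, by omega⟩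
    · rw [if_neg hP, Option.filter_none, if_neg ?_]
      rintro ⟨-, hmax⟩
      omega
  rw [List.filterMap_congr hcond]
  by_cases hfneg : PySem.Chars.find (longest_one.toList.drop k) shortest_one.toList = -1
  · rw [if_pos hfneg]
    apply List.filterMap_eq_nil_iff.mpr
    intro j _
    rw [if_neg]
    rintro ⟨h, -⟩
    exact h hfneg
  · rw [if_neg hfneg]
    have hf0 : 0 ≤ PySem.Chars.find (longest_one.toList.drop k) shortest_one.toList := by omega
    have hm0 : 0 ≤ PySem.Str.len shortest_one := by rw [hm]; exact_mod_cast Nat.zero_le _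
    set s0 := max ((k : Int) + PySem.Chars.find (longest_one.toList.drop k) shortest_one.toList
        + PySem.Str.len shortest_one - 1) ((k : Int) + PySem.Str.len shortest_one) with hs0
    have hks0 : (k : Int) ≤ s0 := le_trans (by omega) (le_max_right _ _)
    have hkL : (k : Int) ≤ PySem.Str.len longest_one := by rw [ht]; omega
    have h1 : (k : Int) ≤ min s0 (PySem.Str.len longest_one) := le_min hks0 hkL
    have h2 : min s0 (PySem.Str.len longest_one) ≤ PySem.Str.len longest_one := min_le_right _ _
    rw [PySem.List.pyRange_one_append (k : Int) (min s0 (PySem.Str.len longest_one))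
        (PySem.Str.len longest_one) h1 h2, List.filterMap_append]
    have hfirst : List.filterMap
        (fun j => if PySem.Chars.find (longest_one.toList.drop k) shortest_one.toList ≠ -1 ∧ s0 ≤ j
          then some (PySem.Str.slice longest_one (some (k : Int)) (some (j + 1))) else none)
        (PySem.List.pyRange (k : Int) (min s0 (PySem.Str.len longest_one)) 1) = [] := by
      apply List.filterMap_eq_nil_iff.mpr
      intro j hj
      rw [PySem.List.mem_pyRange_one] at hj
      rw [if_neg]
      rintro ⟨-, hle⟩
      have : j < s0 := lt_of_lt_of_le hj.2 (min_le_left _ _)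
      omega
    rw [hfirst, List.nil_append]
    by_cases hsL : s0 ≤ PySem.Str.len longest_one
    · rw [min_eq_left hsL]
      have hall : ∀ j ∈ PySem.List.pyRange s0 (PySem.Str.len longest_one) 1,
          (if PySem.Chars.find (longest_one.toList.drop k) shortest_one.toList ≠ -1 ∧ s0 ≤ j
            then some (PySem.Str.slice longest_one (some (k : Int)) (some (j + 1))) else none)
          = some (PySem.Str.slice longest_one (some (k : Int)) (some (j + 1))) := by
        intro j hj
        rw [PySem.List.mem_pyRange_one] at hj
        exact if_pos ⟨hfneg, hj.1⟩
      rw [List.filterMap_congr hall]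
      exact congrFun (List.filterMap_eq_map (f := fun j => PySem.Str.slice longest_one (some (k : Int)) (some (j + 1)))) _
    · rw [min_eq_right (le_of_not_ge hsL),
        PySem.List.pyRange_one_eq_nil (le_refl _),
        PySem.List.pyRange_one_eq_nil (le_of_not_ge hsL)]
      rfl

-- once shortest does not occur in t.drop k, it does not occur in any later suffix
lemma find_drop_mono (t sub : List Char) (k j : Nat) (hkj : k ≤ j)
    (h : PySem.Chars.find (t.drop k) sub = -1) :
    PySem.Chars.find (t.drop j) sub = -1 := by
  rw [PySem.Chars.find_eq_neg_one_iff] at h ⊢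
  intro hin
  apply h
  have hdd : t.drop j = (t.drop k).drop (j - k) := by
    rw [List.drop_drop]; congr 1; omega
  exact hin.trans (hdd ▸ (List.drop_suffix (j - k) (t.drop k)).isInfix)

-- B's while-loop computes, from start index k on, exactly A's filtered inner lists concatenated
lemma cwaiLoop_eq (longest_one shortest_one : String) :
    ∀ (fuel k : Nat), longest_one.toList.length ≤ k + fuel →
      cwaiLoop longest_one shortest_one (PySem.Str.len longest_one)
          (PySem.Str.len shortest_one) (k : Int) fuel =
        (PySem.List.pyRange (k : Int) (PySem.Str.len longest_one) 1).flatMap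
          (cInner longest_one shortest_one (PySem.Str.len longest_one)) := by
  have ht : PySem.Str.len longest_one = (longest_one.toList.length : Int) :=
    PySem.Str.len_eq longest_one
  intro fuel
  induction fuel with
  | zero =>
    intro k hle
    rw [PySem.List.pyRange_one_eq_nil (by rw [ht]; exact_mod_cast by omega)]
    rfl
  | succ fuel' ih =>
    intro k hle
    by_cases hiL : ((k : Int)) < PySem.Str.len longest_one
    · have hkt : k < longest_one.toList.length := by rw [ht] at hiL; exact_mod_cast hiL
      rw [PySem.List.pyRange_one_cons hiL, List.flatMap_cons]
      show (if ((k : Int)) < PySem.Str.len longest_one then _ else _) = _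
      rw [if_pos hiL]
      simp only [PySem.Str.findFrom_eq,
        PySem.Chars.findFrom_natCast longest_one.toList shortest_one.toList k (le_of_lt hkt)]
      by_cases hf : PySem.Chars.find (longest_one.toList.drop k) shortest_one.toList = -1
      · rw [if_pos hf, if_pos rfl]
        rw [cInner_char longest_one shortest_one k hkt, if_pos hf, List.nil_append]
        symm
        apply List.flatMap_eq_nil_iff.mpr
        intro j hj
        rw [PySem.List.mem_pyRange_one, ht] at hj
        have hj0 : 0 ≤ j := by have := hj.1; omega
        have hjcast : j = ((j.toNat : Nat) : Int) := by omega
        rw [hjcast, cInner_char longest_one shortest_one j.toNat (by omega),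
          if_pos (find_drop_mono _ _ k j.toNat (by omega) hf)]
      · have hf0 : 0 ≤ PySem.Chars.find (longest_one.toList.drop k) shortest_one.toList := by
          have := PySem.Chars.neg_one_le_find (longest_one.toList.drop k) shortest_one.toList
          omega
        rw [if_neg hf, if_neg (by omega)]
        rw [cInner_char longest_one shortest_one k hkt, if_neg hf]
        congr 1
        have hcast : ((k : Int)) + 1 = (((k + 1 : Nat)) : Int) := by omega
        rw [hcast]
        exact ih (k + 1) (by omega)
    · show (if ((k : Int)) < PySem.Str.len longest_one then _ else _) = _
      rw [if_neg hiL, PySem.List.pyRange_one_eq_nil (le_of_not_gt hiL)]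
      rfl

-- the shared else-branch: A's foldl-filter over all substrings equals g ++ B's loop output
lemma branch_eq (g : List String) (longest_one shortest_one : String) :
    ((PySem.List.pyRange 0 (PySem.Str.len longest_one) 1).flatMap (fun i =>
        (PySem.List.pyRange i (PySem.Str.len longest_one) 1).filterMap (fun j =>
          let c := PySem.Str.slice longest_one (some i) (some (j + 1))
          if PySem.Str.len shortest_one < PySem.Str.len c then some c else none))).foldl
      (fun acc candidate =>
        if PySem.Str.isIn shortest_one candidate then acc ++ [candidate] else acc) g
    = g ++ cwaiLoop longest_one shortest_one (PySem.Str.len longest_one)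
        (PySem.Str.len shortest_one) 0 (PySem.Str.len longest_one).toNat := by
  rw [PySem.List.foldl_append_if_eq_filter, List.filter_flatMap]
  congr 1
  have h0 : ((0 : Nat) : Int) = (0 : Int) := rfl
  rw [← h0, cwaiLoop_eq longest_one shortest_one (PySem.Str.len longest_one).toNat 0
      (by rw [PySem.Str.len_eq]; omega)]
  rfl

-- ===== VERDICT (by name: the statement is the Claim_ definition above) =====
theorem complete_with_all_intermediate_spec : Claim_equal_complete_with_all_intermediate := by
  intro g _
  unfold Spec_complete_with_all_intermediate
  unfold complete_with_all_intermediate complete_with_all_intermediate_alt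
  by_cases h : g.length < 2
  · rw [if_pos h, if_pos h]
  · rw [if_neg h, if_neg h]
    exact branch_eq _ _ _
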